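-- pv_equiv track=rewrite | github.com/Junnjjj/Algorithm | Sample_Question/BFS/2468.py | bfs
-- ===== SOURCE A (Python) =====
-- from collections import deque
--
-- move = [(1,0),(-1,0),(0,-1),(0,1)]
--
-- def bfs(n, graph, water_height):
--   q = deque()
--   remain_land = 0
--   visited = [[False]*n for _ in range(n)]
--
--   for i in range(n):
--     for j in range(n):
--
--       if not visited[i][j] and graph[i][j] > water_height:
--         q.append((i,j))
--         visited[i][j] = True
--         remain_land += 1
--
--         while q:
--           x,y = q.popleft()
--           for dx,dy in move:
--             nx,ny = x+dx,y+dy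
--             if 0<=nx<n and 0<=ny<n and graph[nx][ny] > water_height and not visited[nx][ny]:
--               q.append((nx,ny))
--               visited[nx][ny] = True
--
--   return remain_land
-- ===== SOURCE B (Python) =====
-- def bfs(n, graph, water_height):
--   # Collect land cells as single indices i*n+j, then repeatedly peel off whole
--   # components: take the smallest remaining index, grow its component to a
--   # fixpoint by set expansion, subtract it, count one component.
--   remaining = set()
--   for i in range(n):
--     for j in range(n):
--       if graph[i][j] > water_height:
--         remaining.add(i * n + j)
--   count = 0
--   while remaining:
--     comp = {min(remaining)}
--     while True:
--       grown = comp | {q for p in comp for q in _neighbors(p, n) if q in remaining}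
--       if grown == comp:
--         break
--       comp = grown
--     remaining -= comp
--     count += 1
--   return count
--
-- def _neighbors(p, n):
--   yield p - n
--   yield p + n
--   if p % n != 0:
--     yield p - 1
--   if (p + 1) % n != 0:
--     yield p + 1
-- ===== Notes on version B (the rewrite author's own statement) =====
-- stated objective: alternative
-- what changed: Replaces the row-major BFS with queue and visited matrix by component peeling on a set of flat cell indices: repeatedly take the smallest remaining land cell, grow its connected component to a fixpoint by whole-set neighbour expansion, subtract it and count one region.
import Mathlib
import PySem

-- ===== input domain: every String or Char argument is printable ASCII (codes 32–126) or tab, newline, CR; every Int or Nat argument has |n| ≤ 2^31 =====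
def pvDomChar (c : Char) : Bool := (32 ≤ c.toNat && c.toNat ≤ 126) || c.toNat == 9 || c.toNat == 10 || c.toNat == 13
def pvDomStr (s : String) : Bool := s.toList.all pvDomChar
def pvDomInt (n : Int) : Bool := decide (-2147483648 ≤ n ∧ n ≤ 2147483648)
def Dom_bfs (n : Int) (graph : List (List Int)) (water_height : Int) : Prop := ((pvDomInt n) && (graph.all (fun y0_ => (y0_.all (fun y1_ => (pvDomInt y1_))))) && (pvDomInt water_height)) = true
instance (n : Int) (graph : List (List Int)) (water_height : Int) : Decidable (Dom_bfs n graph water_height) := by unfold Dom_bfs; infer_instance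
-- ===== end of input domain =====

-- B replaces the BFS queue + visited matrix by repeated component peeling on a set of
-- cell indices: take the smallest remaining land cell, grow its component to a fixpoint
-- by set expansion, subtract it and count one region (objective: alternative algorithm).

-- ===== PORT A =====
-- move = [(1,0),(-1,0),(0,-1),(0,1)]
def pvMove : List (Int × Int) := [(1,0),(-1,0),(0,-1),(0,1)]

-- graph[x][y]  (guarded in range by A's bounds checks; default values never reached under Pre_)
def pvCell (graph : List (List Int)) (x y : Int) : Int :=
  PySem.List.pyGetD (PySem.List.pyGetD graph x []) y 0

-- visited[x][y]
def pvVis (v : List (List Bool)) (x y : Int) : Bool :=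
  PySem.List.pyGetD (PySem.List.pyGetD v x []) y false

-- visited[x][y] = True
def pvSetVis (v : List (List Bool)) (x y : Int) : List (List Bool) :=
  PySem.List.pySetD v x (PySem.List.pySetD (PySem.List.pyGetD v x []) y true)

-- body of `for dx,dy in move: …` for the dequeued cell (x,y); state = (visited, queue tail)
def pvStepA (n water_height : Int) (graph : List (List Int))
    (st : List (List Bool) × List (Int × Int)) (x y : Int) :
    List (List Bool) × List (Int × Int) :=
  pvMove.foldl (fun st d =>
    let nx := x + d.1
    let ny := y + d.2
    if 0 ≤ nx ∧ nx < n ∧ 0 ≤ ny ∧ ny < n ∧ pvCell graph nx ny > water_height ∧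
        pvVis st.1 nx ny = false then
      (pvSetVis st.1 nx ny, st.2 ++ [(nx, ny)])
    else st) st

-- `while q:` — fuel only makes the loop total; it is never exhausted (proved below)
def pvWhileA (n water_height : Int) (graph : List (List Int)) :
    ℕ → List (List Bool) → List (Int × Int) → List (List Bool)
  | _, vis, [] => vis
  | 0, vis, _ :: _ => vis
  | fuel + 1, vis, (x, y) :: rest =>
      let st := pvStepA n water_height graph (vis, rest) x y
      pvWhileA n water_height graph fuel st.1 st.2

def bfs (n : Int) (graph : List (List Int)) (water_height : Int) : Int :=
  let visited0 := List.replicate n.toNat (List.replicate n.toNat false)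
  let res := (PySem.List.pyRange 0 n 1).foldl (fun (st : List (List Bool) × Int) i =>
    (PySem.List.pyRange 0 n 1).foldl (fun (st : List (List Bool) × Int) j =>
      if pvVis st.1 i j = false ∧ pvCell graph i j > water_height then
        let vis := pvSetVis st.1 i j
        (pvWhileA n water_height graph (n.toNat * n.toNat + 1) vis [(i, j)], st.2 + 1)
      else st) st) (visited0, 0)
  res.2

-- ===== PORT B =====
-- _neighbors(p, n)
def pvNbrs (p n : Int) : List Int :=
  [p - n, p + n] ++ (if PySem.Int.mod p n ≠ 0 then [p - 1] else []) ++
    (if PySem.Int.mod (p + 1) n ≠ 0 then [p + 1] else [])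

-- the `remaining` set of land-cell indices i*n+j
def pvLandSet (n : Int) (graph : List (List Int)) (water_height : Int) : PySem.Set Int :=
  (PySem.List.pyRange 0 n 1).foldl (fun s i =>
    (PySem.List.pyRange 0 n 1).foldl (fun s j =>
      if pvCell graph i j > water_height then PySem.Set.add s (i * n + j) else s) s)
    PySem.Set.empty

-- grown = comp | {q for p in comp for q in _neighbors(p, n) if q in remaining}
def pvGrow (n : Int) (remaining comp : PySem.Set Int) : PySem.Set Int :=
  PySem.Set.union comp (comp.foldl (fun acc p =>
    (pvNbrs p n).foldl (fun acc q =>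
      if PySem.Set.contains remaining q then PySem.Set.add acc q else acc) acc)
    PySem.Set.empty)

-- inner `while True:` fixpoint loop — fuel only makes it total; never exhausted (proved below)
def pvGrowLoop (n : Int) (remaining : PySem.Set Int) :
    ℕ → PySem.Set Int → PySem.Set Int
  | 0, comp => comp
  | fuel + 1, comp =>
      let grown := pvGrow n remaining comp
      if PySem.Set.equal grown comp then comp else pvGrowLoop n remaining fuel grown

-- outer `while remaining:` loop — fuel = |remaining| suffices (proved below)
def pvPeel (n : Int) : ℕ → PySem.Set Int → Int → Int
  | 0, _, count => count
  | fuel + 1, remaining, count =>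
      if remaining = [] then count
      else
        let m := (PySem.List.min? remaining (fun x => x)).getD 0
        let comp := pvGrowLoop n remaining (n.toNat * n.toNat + 1)
          (PySem.Set.add PySem.Set.empty m)
        pvPeel n fuel (PySem.Set.diff remaining comp) (count + 1)

def bfs_alt (n : Int) (graph : List (List Int)) (water_height : Int) : Int :=
  let remaining := pvLandSet n graph water_height
  pvPeel n remaining.length remaining 0


-- ===== PRECONDITION & SPEC =====
-- Pre_ excludes exactly the inputs where Python A raises IndexError: grids with fewer
-- than n rows, or one of the first n rows shorter than n.
def Pre_bfs (n : Int) (graph : List (List Int)) (_water_height : Int) : Prop :=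
  n ≤ (graph.length : Int) ∧ ∀ row ∈ graph.take n.toNat, n ≤ (row.length : Int)
instance (n : Int) (graph : List (List Int)) (water_height : Int) : Decidable (Pre_bfs n graph water_height) := by unfold Pre_bfs; infer_instance

def pvWitness_bfs : Int × List (List Int) × Int := (2, [[1, 0], [0, 2]], 0)

def Spec_bfs (n : Int) (graph : List (List Int)) (water_height : Int) (out : Int) : Prop := out = bfs_alt n graph water_height
instance (n : Int) (graph : List (List Int)) (water_height : Int) (out : Int) : Decidable (Spec_bfs n graph water_height out) := by unfold Spec_bfs; infer_instance

-- ===== CLAIM (what is proved, stated in full; the proofs are below) =====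
def Claim_equal_bfs : Prop := ∀ (n : Int) (graph : List (List Int)) (water_height : Int), Dom_bfs n graph water_height → Pre_bfs n graph water_height → Spec_bfs n graph water_height (bfs n graph water_height)

-- ===== LEMMAS AND PROOFS =====
def pvUniv (n : Int) (g : List (List Int)) (w : Int) : Finset Int :=
  ((Finset.range ((n*n).toNat)).image (Nat.cast : ℕ → Int)).filter
    (fun p => pvCell g (p.ediv n) (p.emod n) > w)

def pvNbrM (n p : Int) : List Int :=
  (if p + n < n*n then [p+n] else []) ++ (if 0 ≤ p - n then [p-n] else []) ++
  (if p.emod n ≠ 0 then [p-1] else []) ++ (if (p+1).emod n ≠ 0 then [p+1] else [])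

def pvAdj (n : Int) (g : List (List Int)) (w : Int) (p q : Int) : Prop :=
  p ∈ pvUniv n g w ∧ q ∈ pvUniv n g w ∧ q ∈ pvNbrM n p

def pvExpand (n : Int) (g : List (List Int)) (w : Int) (S : Finset Int) : Finset Int :=
  S ∪ (pvUniv n g w).filter (fun q => ∃ p ∈ S, q ∈ pvNbrM n p)

def pvR (n : Int) (g : List (List Int)) (w : Int) (c : Int) : Finset Int :=
  (pvExpand n g w)^[(pvUniv n g w).card + 1] {c}

-- membership bound of universe
lemma pvUniv_bounds {n : Int} {g : List (List Int)} {w : Int} {p : Int}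
    (h : p ∈ pvUniv n g w) : 0 ≤ p ∧ p < n*n := by
  simp [pvUniv, Finset.mem_filter, Finset.mem_image, Finset.mem_range] at h
  rcases h with ⟨⟨k, hk, rfl⟩, -⟩
  omega

lemma mem_pvNbrM {n p q : Int} :
    q ∈ pvNbrM n p ↔ (q = p + n ∧ p + n < n*n) ∨ (q = p - n ∧ 0 ≤ p - n) ∨
      (q = p - 1 ∧ p.emod n ≠ 0) ∨ (q = p + 1 ∧ (p + 1).emod n ≠ 0) := by
  simp only [pvNbrM, List.mem_append, List.mem_ite_nil_right, List.mem_singleton]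
  tauto

-- neighbour symmetry inside the square
lemma pvNbrM_symm {n p q : Int} (hp : 0 ≤ p ∧ p < n*n) (hq : 0 ≤ q ∧ q < n*n)
    (h : q ∈ pvNbrM n p) : p ∈ pvNbrM n q := by
  rw [mem_pvNbrM] at h
  rw [mem_pvNbrM]
  rcases h with ⟨rfl, h⟩ | ⟨rfl, h⟩ | ⟨rfl, h⟩ | ⟨rfl, h⟩
  · exact Or.inr (Or.inl ⟨by ring, by omega⟩)
  · exact Or.inl ⟨by ring, by omega⟩
  · refine Or.inr (Or.inr (Or.inr ⟨by ring, ?_⟩))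
    simpa using h
  · refine Or.inr (Or.inr (Or.inl ⟨by ring, ?_⟩))
    simpa using h

lemma pvAdj_symm {n : Int} {g : List (List Int)} {w : Int} {p q : Int}
    (h : pvAdj n g w p q) : pvAdj n g w q p :=
  ⟨h.2.1, h.1, pvNbrM_symm (pvUniv_bounds h.1) (pvUniv_bounds h.2.1) h.2.2⟩

lemma subset_pvExpand (n : Int) (g : List (List Int)) (w : Int) (S : Finset Int) :
    S ⊆ pvExpand n g w S := Finset.subset_union_left

lemma pvExpand_subset_union (n : Int) (g : List (List Int)) (w : Int) (S : Finset Int) :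
    pvExpand n g w S ⊆ S ∪ pvUniv n g w :=
  Finset.union_subset_union_right (Finset.filter_subset _ _)

def pvClosed (n : Int) (g : List (List Int)) (w : Int) (T : Finset Int) : Prop :=
  ∀ p ∈ T, ∀ q, pvAdj n g w p q → q ∈ T

lemma pvExpand_subset_of_closed {n : Int} {g : List (List Int)} {w : Int} {S T : Finset Int}
    (hT : pvClosed n g w T) (hSU : S ⊆ pvUniv n g w) (hS : S ⊆ T) :
    pvExpand n g w S ⊆ T := by
  intro q hq
  rcases Finset.mem_union.1 hq with h | h
  · exact hS h
  · rcases Finset.mem_filter.1 h with ⟨hqU, p, hpS, hnb⟩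
    exact hT p (hS hpS) q ⟨hSU hpS, hqU, hnb⟩

lemma pvIter_subset_univ {n : Int} {g : List (List Int)} {w : Int} {c : Int}
    (hc : c ∈ pvUniv n g w) (k : ℕ) :
    (pvExpand n g w)^[k] {c} ⊆ pvUniv n g w := by
  induction k with
  | zero => simpa using Finset.singleton_subset_iff.2 hc
  | succ k ih =>
      rw [Function.iterate_succ_apply']
      exact (pvExpand_subset_union n g w _).trans (Finset.union_subset ih (Finset.Subset.refl _))

lemma pvR_fixed {n : Int} {g : List (List Int)} {w : Int} {c : Int}
    (hc : c ∈ pvUniv n g w) :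
    pvExpand n g w (pvR n g w c) = pvR n g w c := by
  set N := (pvUniv n g w).card with hN
  have hfix : ∃ k ≤ N, pvExpand n g w ((pvExpand n g w)^[k] {c}) = (pvExpand n g w)^[k] {c} := by
    by_contra hno
    push Not at hno
    have hcard : ∀ k ≤ N + 1, k + 1 ≤ ((pvExpand n g w)^[k] {c}).card := by
      intro k hk
      induction k with
      | zero => simp
      | succ k ih =>
          have hne : pvExpand n g w ((pvExpand n g w)^[k] {c}) ≠ (pvExpand n g w)^[k] {c} :=
            hno k (by omega)
          have hss : (pvExpand n g w)^[k] {c} ⊂ (pvExpand n g w)^[k+1] {c} := by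
            rw [Function.iterate_succ_apply']
            exact lt_of_le_of_ne (subset_pvExpand n g w _) (Ne.symm hne)
          have := Finset.card_lt_card hss
          have := ih (by omega)
          omega
    have h1 := hcard (N + 1) le_rfl
    have h2 : ((pvExpand n g w)^[N+1] {c}).card ≤ N := by
      rw [hN]
      exact Finset.card_le_card (pvIter_subset_univ hc (N+1))
    omega
  rcases hfix with ⟨k, hk, hfix⟩
  have hstable : ∀ m, (pvExpand n g w)^[k + m] {c} = (pvExpand n g w)^[k] {c} := by
    intro m
    induction m with
    | zero => rfl
    | succ m ih =>
        have : k + (m + 1) = (k + m) + 1 := by omega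
        rw [this, Function.iterate_succ_apply', ih, hfix]
  have e : (pvExpand n g w)^[N+1] {c} = (pvExpand n g w)^[k] {c} := by
    rw [← hstable (N + 1 - k)]
    congr 1
    omega
  show pvExpand n g w ((pvExpand n g w)^[N+1] {c}) = (pvExpand n g w)^[N+1] {c}
  rw [e, hfix]

lemma pvR_self (n : Int) (g : List (List Int)) (w : Int) (c : Int) :
    c ∈ pvR n g w c := by
  have : ({c} : Finset Int) ⊆ pvR n g w c := by
    unfold pvR
    generalize (pvUniv n g w).card + 1 = k
    induction k with
    | zero => simp
    | succ k ih =>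
        rw [Function.iterate_succ_apply']
        exact ih.trans (subset_pvExpand n g w _)
  simpa using this

lemma pvR_closed {n : Int} {g : List (List Int)} {w : Int} {c : Int}
    (hc : c ∈ pvUniv n g w) : pvClosed n g w (pvR n g w c) := by
  intro p hp q hq
  have : q ∈ pvExpand n g w (pvR n g w c) := by
    exact Finset.mem_union.2 (Or.inr (Finset.mem_filter.2 ⟨hq.2.1, p, hp, hq.2.2⟩))
  rwa [pvR_fixed hc] at this

lemma pvR_least {n : Int} {g : List (List Int)} {w : Int} {c : Int} {T : Finset Int}
    (hT : pvClosed n g w T) (hcU : c ∈ pvUniv n g w) (hc : c ∈ T) :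
    pvR n g w c ⊆ T := by
  unfold pvR
  generalize (pvUniv n g w).card + 1 = k
  induction k with
  | zero => simpa using hc
  | succ k ih =>
      rw [Function.iterate_succ_apply']
      exact pvExpand_subset_of_closed hT (pvIter_subset_univ hcU k) ih

lemma pvR_subset_univ {n : Int} {g : List (List Int)} {w : Int} {c : Int}
    (hc : c ∈ pvUniv n g w) : pvR n g w c ⊆ pvUniv n g w :=
  pvIter_subset_univ hc _

lemma pvR_symm {n : Int} {g : List (List Int)} {w : Int} {c d : Int}
    (hc : c ∈ pvUniv n g w) (hd : d ∈ pvR n g w c) : c ∈ pvR n g w d := by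
  have hgen : ∀ k, ∀ d ∈ (pvExpand n g w)^[k] {c}, c ∈ pvR n g w d := by
    intro k
    induction k with
    | zero => intro d hd; simp at hd; subst hd; exact pvR_self n g w d
    | succ k ih =>
        intro d hd
        rw [Function.iterate_succ_apply'] at hd
        rcases Finset.mem_union.1 hd with h | h
        · exact ih d h
        · rcases Finset.mem_filter.1 h with ⟨hdU, p, hpS, hnb⟩
          have hpU : p ∈ pvUniv n g w := pvIter_subset_univ hc k hpS
          have hadj : pvAdj n g w d p := pvAdj_symm ⟨hpU, hdU, hnb⟩
          have hpRd : p ∈ pvR n g w d := pvR_closed hdU d (pvR_self n g w d) p hadj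
          have : pvR n g w p ⊆ pvR n g w d := pvR_least (pvR_closed hdU) hpU hpRd
          exact this (ih p hpS)
  exact hgen _ d hd

lemma pvR_congr {n : Int} {g : List (List Int)} {w : Int} {c d : Int}
    (hc : c ∈ pvUniv n g w) (hd : d ∈ pvR n g w c) : pvR n g w d = pvR n g w c := by
  have hdU : d ∈ pvUniv n g w := pvR_subset_univ hc hd
  apply Finset.Subset.antisymm
  · exact pvR_least (pvR_closed hc) hdU hd
  · exact pvR_least (pvR_closed hdU) hc (pvR_symm hc hd)

-- sequential "mark new land neighbours" (mirrors the 4-move fold's visited updates)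
def pvSeqFilter (n : Int) (g : List (List Int)) (w : Int) : List Int → Finset Int → List Int
  | [], _ => []
  | q :: qs, V =>
      if q ∈ pvUniv n g w ∧ q ∉ V then q :: pvSeqFilter n g w qs (insert q V)
      else pvSeqFilter n g w qs V

lemma mem_pvSeqFilter {n : Int} {g : List (List Int)} {w : Int} {x : Int} :
    ∀ (cs : List Int) (V : Finset Int),
      x ∈ pvSeqFilter n g w cs V ↔ x ∈ cs ∧ x ∈ pvUniv n g w ∧ x ∉ V := by
  intro cs
  induction cs with
  | nil => intro V; simp [pvSeqFilter]
  | cons c cs ih =>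
      intro V
      simp only [pvSeqFilter]
      split
      · rename_i h
        simp only [List.mem_cons, ih]
        constructor
        · rintro (rfl | ⟨h1, h2, h3⟩)
          · exact ⟨Or.inl rfl, h.1, h.2⟩
          · exact ⟨Or.inr h1, h2, fun hx => h3 (Finset.mem_insert_of_mem hx)⟩
        · rintro ⟨rfl | h1, h2, h3⟩
          · exact Or.inl rfl
          · by_cases hxc : x = c
            · exact Or.inl hxc
            · exact Or.inr ⟨h1, h2, fun hx => by
                rcases Finset.mem_insert.1 hx with h' | h'
                · exact hxc h'
                · exact h3 h'⟩
      · rename_i h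
        rw [ih]
        simp only [List.mem_cons]
        constructor
        · rintro ⟨h1, h2, h3⟩; exact ⟨Or.inr h1, h2, h3⟩
        · rintro ⟨rfl | h1, h2, h3⟩
          · exact absurd ⟨h2, h3⟩ h
          · exact ⟨h1, h2, h3⟩

lemma nodup_pvSeqFilter (n : Int) (g : List (List Int)) (w : Int) :
    ∀ (cs : List Int) (V : Finset Int), (pvSeqFilter n g w cs V).Nodup := by
  intro cs
  induction cs with
  | nil => intro V; simp [pvSeqFilter]
  | cons c cs ih =>
      intro V
      simp only [pvSeqFilter]
      split
      · refine List.nodup_cons.2 ⟨fun hmem => ?_, ih _⟩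
        have := (mem_pvSeqFilter _ _).1 hmem
        exact this.2.2 (Finset.mem_insert_self _ _)
      · exact ih _

lemma card_union_pvSeqFilter (n : Int) (g : List (List Int)) (w : Int) :
    ∀ (cs : List Int) (V : Finset Int),
      (V ∪ (pvSeqFilter n g w cs V).toFinset).card
        = V.card + (pvSeqFilter n g w cs V).length := by
  intro cs
  induction cs with
  | nil => intro V; simp [pvSeqFilter]
  | cons c cs ih =>
      intro V
      simp only [pvSeqFilter]
      split
      · rename_i h
        simp only [List.toFinset_cons, List.length_cons]
        have e : V ∪ insert c (pvSeqFilter n g w cs (insert c V)).toFinset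
            = insert c V ∪ (pvSeqFilter n g w cs (insert c V)).toFinset := by
          ext x
          simp only [Finset.mem_union, Finset.mem_insert, List.mem_toFinset]
          tauto
        rw [e, ih]
        rw [Finset.card_insert_of_notMem h.2]
        omega
      · exact ih V

-- union of components of a queue
def pvRU (n : Int) (g : List (List Int)) (w : Int) (q : List Int) : Finset Int :=
  q.foldr (fun p acc => pvR n g w p ∪ acc) ∅

lemma mem_pvRU {n : Int} {g : List (List Int)} {w : Int} {x : Int} :
    ∀ {q : List Int}, x ∈ pvRU n g w q ↔ ∃ p ∈ q, x ∈ pvR n g w p := by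
  intro q
  induction q with
  | nil => simp [pvRU]
  | cons p rest ih =>
      simp only [pvRU, List.foldr_cons, Finset.mem_union, List.mem_cons]
      rw [show (List.foldr (fun p acc => pvR n g w p ∪ acc) ∅ rest) = pvRU n g w rest from rfl, ih]
      constructor
      · rintro (h | ⟨p', hp', hx⟩)
        · exact ⟨p, Or.inl rfl, h⟩
        · exact ⟨p', Or.inr hp', hx⟩
      · rintro ⟨p', rfl | hp', hx⟩
        · exact Or.inl hx
        · exact Or.inr ⟨p', hp', hx⟩

lemma pvRU_append {n : Int} {g : List (List Int)} {w : Int} (q r : List Int) :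
    pvRU n g w (q ++ r) = pvRU n g w q ∪ pvRU n g w r := by
  ext x
  simp only [mem_pvRU, Finset.mem_union, List.mem_append]
  constructor
  · rintro ⟨p, h | h, hx⟩
    · exact Or.inl ⟨p, h, hx⟩
    · exact Or.inr ⟨p, h, hx⟩
  · rintro (⟨p, h, hx⟩ | ⟨p, h, hx⟩)
    · exact ⟨p, Or.inl h, hx⟩
    · exact ⟨p, Or.inr h, hx⟩

-- model of A's inner while loop
def pvFlood (n : Int) (g : List (List Int)) (w : Int) :
    ℕ → Finset Int → List Int → Finset Int
  | _, V, [] => V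
  | 0, V, _ :: _ => V
  | fuel + 1, V, p :: rest =>
      let fresh := pvSeqFilter n g w (pvNbrM n p) V
      pvFlood n g w fuel (V ∪ fresh.toFinset) (rest ++ fresh)

lemma pvFlood_subset {n : Int} {g : List (List Int)} {w : Int} :
    ∀ (fuel : ℕ) (q : List Int) (V : Finset Int), (∀ p ∈ q, p ∈ pvUniv n g w) →
      pvFlood n g w fuel V q ⊆ V ∪ pvRU n g w q := by
  intro fuel
  induction fuel with
  | zero =>
      intro q V hq
      cases q with
      | nil => simp [pvFlood]
      | cons p rest => simp [pvFlood]
  | succ fuel ih =>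
      intro q V hq
      cases q with
      | nil => simp [pvFlood]
      | cons p rest =>
          simp only [pvFlood]
          have hpU : p ∈ pvUniv n g w := hq p (List.mem_cons_self ..)
          have hfresh : ∀ x ∈ pvSeqFilter n g w (pvNbrM n p) V, x ∈ pvR n g w p := by
            intro x hx
            rcases (mem_pvSeqFilter _ _).1 hx with ⟨h1, h2, _⟩
            exact pvR_closed hpU p (pvR_self n g w p) x ⟨hpU, h2, h1⟩
          have hq' : ∀ x ∈ rest ++ pvSeqFilter n g w (pvNbrM n p) V, x ∈ pvUniv n g w := by
            intro x hx
            rcases List.mem_append.1 hx with h | h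
            · exact hq x (List.mem_cons_of_mem _ h)
            · exact pvR_subset_univ hpU (hfresh x h)
          refine (ih _ _ hq').trans ?_
          intro x hx
          simp only [Finset.mem_union, List.mem_toFinset, pvRU_append, mem_pvRU] at hx ⊢
          rcases hx with (h | h) | (⟨y, hy, hyR⟩ | ⟨y, hy, hyR⟩)
          · exact Or.inl h
          · exact Or.inr ⟨p, List.mem_cons_self .., hfresh x h⟩
          · exact Or.inr ⟨y, List.mem_cons_of_mem _ hy, hyR⟩
          · have : pvR n g w y = pvR n g w p := pvR_congr hpU (hfresh y hy)
            exact Or.inr ⟨p, List.mem_cons_self .., this ▸ hyR⟩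

lemma pvFlood_closed {n : Int} {g : List (List Int)} {w : Int} :
    ∀ (fuel : ℕ) (q : List Int) (V : Finset Int),
      (∀ p ∈ q, p ∈ V) → V ⊆ pvUniv n g w →
      (∀ c ∈ V, c ∉ q → ∀ d, pvAdj n g w c d → d ∈ V) →
      q.length + (pvUniv n g w \ V).card ≤ fuel →
      V ⊆ pvFlood n g w fuel V q ∧ pvClosed n g w (pvFlood n g w fuel V q) := by
  intro fuel
  induction fuel with
  | zero =>
      intro q V hqV hVU hdone hfuel
      cases q with
      | nil =>
          refine ⟨by simp [pvFlood], ?_⟩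
          intro c hc d hd
          exact hdone c (by simpa [pvFlood] using hc) (by simp) d hd
      | cons p rest => simp at hfuel
  | succ fuel ih =>
      intro q V hqV hVU hdone hfuel
      cases q with
      | nil =>
          refine ⟨by simp [pvFlood], ?_⟩
          intro c hc d hd
          exact hdone c (by simpa [pvFlood] using hc) (by simp) d hd
      | cons p rest =>
          simp only [pvFlood]
          set fresh := pvSeqFilter n g w (pvNbrM n p) V with hfreshdef
          have hfreshU : ∀ x ∈ fresh, x ∈ pvUniv n g w ∧ x ∉ V := by
            intro x hx
            have := (mem_pvSeqFilter _ _).1 hx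
            exact ⟨this.2.1, this.2.2⟩
          have h1 : ∀ x ∈ rest ++ fresh, x ∈ V ∪ fresh.toFinset := by
            intro x hx
            rcases List.mem_append.1 hx with h | h
            · exact Finset.mem_union.2 (Or.inl (hqV x (List.mem_cons_of_mem _ h)))
            · exact Finset.mem_union.2 (Or.inr (List.mem_toFinset.2 h))
          have h2 : V ∪ fresh.toFinset ⊆ pvUniv n g w := by
            intro x hx
            rcases Finset.mem_union.1 hx with h | h
            · exact hVU h
            · exact (hfreshU x (List.mem_toFinset.1 h)).1
          have h3 : ∀ c ∈ V ∪ fresh.toFinset, c ∉ rest ++ fresh →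
              ∀ d, pvAdj n g w c d → d ∈ V ∪ fresh.toFinset := by
            intro c hc hcq d hd
            have hcf : c ∉ fresh := fun h => hcq (List.mem_append.2 (Or.inr h))
            have hcV : c ∈ V := by
              rcases Finset.mem_union.1 hc with h | h
              · exact h
              · exact absurd (List.mem_toFinset.1 h) hcf
            by_cases hcp : c = p
            · subst hcp
              by_cases hdV : d ∈ V
              · exact Finset.mem_union.2 (Or.inl hdV)
              · refine Finset.mem_union.2 (Or.inr (List.mem_toFinset.2 ?_))
                exact (mem_pvSeqFilter _ _).2 ⟨hd.2.2, hd.2.1, hdV⟩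
            · have : c ∉ (p :: rest) := by
                simp only [List.mem_cons]
                rintro (h | h)
                · exact hcp h
                · exact hcq (List.mem_append.2 (Or.inl h))
              exact Finset.mem_union.2 (Or.inl (hdone c hcV this d hd))
          have h4 : (rest ++ fresh).length + (pvUniv n g w \ (V ∪ fresh.toFinset)).card ≤ fuel := by
            have hcard : (V ∪ fresh.toFinset).card = V.card + fresh.length :=
              card_union_pvSeqFilter n g w _ _
            have hsub : fresh.toFinset ⊆ pvUniv n g w \ V := by
              intro x hx
              have := hfreshU x (List.mem_toFinset.1 hx)
              exact Finset.mem_sdiff.2 ⟨this.1, this.2⟩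
            have hcardf : fresh.toFinset.card = fresh.length :=
              List.toFinset_card_of_nodup (nodup_pvSeqFilter n g w _ _)
            have hdiff : (pvUniv n g w \ (V ∪ fresh.toFinset)).card
                = (pvUniv n g w \ V).card - fresh.length := by
              have e : pvUniv n g w \ (V ∪ fresh.toFinset)
                  = (pvUniv n g w \ V) \ fresh.toFinset := by
                ext x
                simp only [Finset.mem_sdiff, Finset.mem_union]
                tauto
              rw [e, Finset.card_sdiff]
              rw [Finset.inter_eq_left.2 hsub, hcardf]
            have hle : fresh.length ≤ (pvUniv n g w \ V).card := by
              calc fresh.length = fresh.toFinset.card := hcardf.symm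
                _ ≤ (pvUniv n g w \ V).card := Finset.card_le_card hsub
            simp only [List.length_append, hdiff]
            simp only [List.length_cons] at hfuel
            omega
          rcases ih (rest ++ fresh) (V ∪ fresh.toFinset) h1 h2 h3 h4 with ⟨ha, hb⟩
          exact ⟨Finset.subset_union_left.trans ha, hb⟩

lemma pvFlood_seed {n : Int} {g : List (List Int)} {w : Int} {k : Int} {V : Finset Int}
    {fuel : ℕ} (hk : k ∈ pvUniv n g w) (hkV : k ∉ V) (hVU : V ⊆ pvUniv n g w)
    (hVcl : pvClosed n g w V)
    (hfuel : 1 + (pvUniv n g w \ insert k V).card ≤ fuel) :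
    pvFlood n g w fuel (insert k V) [k] = V ∪ pvR n g w k := by
  apply Finset.Subset.antisymm
  · refine (pvFlood_subset fuel [k] (insert k V) ?_).trans ?_
    · intro p hp; simp at hp; subst hp; exact hk
    · intro x hx
      rcases Finset.mem_union.1 hx with h | h
      · rcases Finset.mem_insert.1 h with h' | h'
        · exact Finset.mem_union.2 (Or.inr (h' ▸ pvR_self n g w k))
        · exact Finset.mem_union.2 (Or.inl h')
      · rcases mem_pvRU.1 h with ⟨p, hp, hx'⟩
        simp at hp; subst hp
        exact Finset.mem_union.2 (Or.inr hx')
  · have h := pvFlood_closed fuel [k] (insert k V)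
      (by intro p hp; simp at hp; subst hp; exact Finset.mem_insert_self _ _)
      (Finset.insert_subset hk hVU)
      (by
        intro c hc hck d hd
        have hcV : c ∈ V := by
          rcases Finset.mem_insert.1 hc with h' | h'
          · exact absurd (by simp [h']) hck
          · exact h'
        exact Finset.mem_insert_of_mem (hVcl c hcV d hd))
      (by simpa using hfuel)
    rcases h with ⟨hsub, hcl⟩
    have hkW : k ∈ pvFlood n g w fuel (insert k V) [k] := hsub (Finset.mem_insert_self _ _)
    have hRk : pvR n g w k ⊆ pvFlood n g w fuel (insert k V) [k] := pvR_least hcl hk hkW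
    intro x hx
    rcases Finset.mem_union.1 hx with h | h
    · exact hsub (Finset.mem_insert_of_mem h)
    · exact hRk h

-- the common count: land cells that are the smallest cell of their component
def pvCount (n : Int) (g : List (List Int)) (w : Int) (S : Finset Int) : ℕ :=
  (S.filter (fun c => ∀ d ∈ pvR n g w c, c ≤ d)).card

-- state of A's outer loop after all cells < k have been processed
def pvVisSet (n : Int) (g : List (List Int)) (w : Int) (k : Int) : Finset Int :=
  (pvUniv n g w).filter (fun c => ∃ d ∈ pvR n g w c, d < k)

def pvCnt (n : Int) (g : List (List Int)) (w : Int) (k : Int) : ℕ :=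
  ((pvUniv n g w).filter (fun c => (∀ d ∈ pvR n g w c, c ≤ d) ∧ c < k)).card

lemma pvVisSet_subset (n : Int) (g : List (List Int)) (w : Int) (k : Int) :
    pvVisSet n g w k ⊆ pvUniv n g w := Finset.filter_subset _ _

lemma pvVisSet_closed (n : Int) (g : List (List Int)) (w : Int) (k : Int) :
    pvClosed n g w (pvVisSet n g w k) := by
  intro c hc q hq
  rcases Finset.mem_filter.1 hc with ⟨hcU, d, hd, hdk⟩
  have hqRc : q ∈ pvR n g w c := pvR_closed hcU c (pvR_self n g w c) q hq
  refine Finset.mem_filter.2 ⟨hq.2.1, d, ?_, hdk⟩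
  rw [pvR_congr hcU hqRc]
  exact hd

lemma pvVisSet_zero (n : Int) (g : List (List Int)) (w : Int) :
    pvVisSet n g w 0 = ∅ := by
  rw [Finset.eq_empty_iff_forall_notMem]
  intro c hc
  rcases Finset.mem_filter.1 hc with ⟨hcU, d, hd, hdk⟩
  have : d ∈ pvUniv n g w := pvR_subset_univ hcU hd
  have := (pvUniv_bounds this).1
  omega

lemma pvCnt_zero (n : Int) (g : List (List Int)) (w : Int) : pvCnt n g w 0 = 0 := by
  unfold pvCnt
  rw [Finset.card_eq_zero, Finset.eq_empty_iff_forall_notMem]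
  intro c hc
  rcases Finset.mem_filter.1 hc with ⟨hcU, _, hck⟩
  have := (pvUniv_bounds hcU).1
  omega

lemma pvCnt_final (n : Int) (g : List (List Int)) (w : Int) :
    pvCnt n g w (n*n) = pvCount n g w (pvUniv n g w) := by
  unfold pvCnt pvCount
  congr 1
  apply Finset.filter_congr
  intro c hc
  have := pvUniv_bounds hc
  constructor
  · exact fun h => h.1
  · exact fun h => ⟨h, by omega⟩

-- the three cases of one cell step
lemma pvCellStep_skip {n : Int} {g : List (List Int)} {w : Int} {k : Int}
    (h : k ∉ pvUniv n g w ∨ k ∈ pvVisSet n g w k) :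
    pvVisSet n g w (k+1) = pvVisSet n g w k ∧ pvCnt n g w (k+1) = pvCnt n g w k := by
  constructor
  · ext c
    simp only [pvVisSet, Finset.mem_filter]
    constructor
    · rintro ⟨hcU, d, hd, hdk⟩
      refine ⟨hcU, ?_⟩
      by_cases hdk' : d < k
      · exact ⟨d, hd, hdk'⟩
      · have hdkk : d = k := by omega
        subst hdkk
        rcases h with h | h
        · exact absurd (pvR_subset_univ hcU hd) h
        · rcases Finset.mem_filter.1 h with ⟨hkU, e, he, hek⟩
          refine ⟨e, ?_, hek⟩
          rw [← pvR_congr hcU hd]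
          exact he
    · rintro ⟨hcU, d, hd, hdk⟩
      exact ⟨hcU, d, hd, by omega⟩
  · unfold pvCnt
    congr 1
    apply Finset.filter_congr
    intro c hcU
    constructor
    · rintro ⟨hmin, hck⟩
      refine ⟨hmin, ?_⟩
      by_cases hck' : c < k
      · exact hck'
      · have : c = k := by omega
        subst this
        rcases h with h | h
        · exact absurd hcU h
        · rcases Finset.mem_filter.1 h with ⟨-, e, he, hek⟩
          have := hmin e he
          omega
    · rintro ⟨hmin, hck⟩
      exact ⟨hmin, by omega⟩

lemma pvCellStep_new {n : Int} {g : List (List Int)} {w : Int} {k : Int}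
    (hkU : k ∈ pvUniv n g w) (hkV : k ∉ pvVisSet n g w k) :
    pvVisSet n g w (k+1) = pvVisSet n g w k ∪ pvR n g w k ∧
      pvCnt n g w (k+1) = pvCnt n g w k + 1 ∧ (∀ d ∈ pvR n g w k, k ≤ d) := by
  have hmin : ∀ d ∈ pvR n g w k, k ≤ d := by
    intro d hd
    by_contra hlt
    push Not at hlt
    have hdU : d ∈ pvUniv n g w := pvR_subset_univ hkU hd
    have : k ∈ pvVisSet n g w k := by
      refine Finset.mem_filter.2 ⟨hkU, d, hd, hlt⟩
    exact hkV this
  refine ⟨?_, ?_, hmin⟩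
  · ext c
    simp only [pvVisSet, Finset.mem_filter, Finset.mem_union]
    constructor
    · rintro ⟨hcU, d, hd, hdk⟩
      by_cases hdk' : d < k
      · exact Or.inl ⟨hcU, d, hd, hdk'⟩
      · have : d = k := by omega
        subst this
        exact Or.inr (pvR_symm hcU hd)
    · rintro (⟨hcU, d, hd, hdk⟩ | h)
      · exact ⟨hcU, d, hd, by omega⟩
      · have hcU : c ∈ pvUniv n g w := pvR_subset_univ hkU h
        refine ⟨hcU, k, ?_, by omega⟩
        rw [pvR_congr hkU h]
        exact pvR_self n g w k
  · unfold pvCnt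
    have e : (pvUniv n g w).filter (fun c => (∀ d ∈ pvR n g w c, c ≤ d) ∧ c < k + 1)
        = insert k ((pvUniv n g w).filter (fun c => (∀ d ∈ pvR n g w c, c ≤ d) ∧ c < k)) := by
      ext c
      simp only [Finset.mem_insert, Finset.mem_filter]
      constructor
      · rintro ⟨hcU, hm, hck⟩
        by_cases h : c = k
        · exact Or.inl h
        · exact Or.inr ⟨hcU, hm, by omega⟩
      · rintro (rfl | ⟨hcU, hm, hck⟩)
        · exact ⟨hkU, hmin, by omega⟩
        · exact ⟨hcU, hm, by omega⟩
    rw [e, Finset.card_insert_of_notMem]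
    simp only [Finset.mem_filter]
    rintro ⟨-, -, hk⟩
    omega


-- ===== B side =====
lemma mem_pvNbrs_iff {n p q : Int} (hn : 0 < n) (hq : 0 ≤ q ∧ q < n*n) :
    q ∈ pvNbrs p n ↔ q ∈ pvNbrM n p := by
  have hmod : ∀ a : Int, PySem.Int.mod a n = a.emod n := fun a =>
    PySem.Int.mod_eq_emod_of_pos hn
  rw [mem_pvNbrM]
  simp only [pvNbrs, List.mem_append, List.mem_ite_nil_right, List.mem_cons, List.not_mem_nil, or_false, hmod]
  constructor
  · rintro (((rfl | rfl) | ⟨h, rfl⟩) | ⟨h, rfl⟩)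
    · exact Or.inr (Or.inl ⟨rfl, by omega⟩)
    · exact Or.inl ⟨rfl, by omega⟩
    · exact Or.inr (Or.inr (Or.inl ⟨rfl, h⟩))
    · exact Or.inr (Or.inr (Or.inr ⟨rfl, h⟩))
  · rintro (⟨rfl, h⟩ | ⟨rfl, h⟩ | ⟨rfl, h⟩ | ⟨rfl, h⟩)
    · exact Or.inl (Or.inl (Or.inr rfl))
    · exact Or.inl (Or.inl (Or.inl rfl))
    · exact Or.inl (Or.inr ⟨h, rfl⟩)
    · exact Or.inr ⟨h, rfl⟩

lemma pvGrow_inner_mem {n : Int} (RL : PySem.Set Int) (p : Int) {x : Int} :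
    ∀ acc : PySem.Set Int,
      (x ∈ (pvNbrs p n).foldl (fun acc q =>
          if PySem.Set.contains RL q then PySem.Set.add acc q else acc) acc ↔
        x ∈ acc ∨ (x ∈ pvNbrs p n ∧ x ∈ RL)) := by
  generalize hcs : pvNbrs p n = cs
  have : ∀ (cs' : List Int) (acc : PySem.Set Int),
      x ∈ cs'.foldl (fun acc q =>
          if PySem.Set.contains RL q then PySem.Set.add acc q else acc) acc ↔
        x ∈ acc ∨ (x ∈ cs' ∧ x ∈ RL) := by
    intro cs'
    induction cs' with
    | nil => intro acc; simp
    | cons c cs' ih =>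
        intro acc
        simp only [List.foldl_cons, List.mem_cons, ih]
        by_cases hc : PySem.Set.contains RL c = true
        · rw [if_pos hc, PySem.Set.mem_add]
          have := PySem.Set.contains_iff RL c
          constructor
          · rintro ((h | rfl) | h)
            · exact Or.inl h
            · exact Or.inr ⟨Or.inl rfl, this.1 hc⟩
            · exact Or.inr ⟨Or.inr h.1, h.2⟩
          · rintro (h | ⟨rfl | h1, h2⟩)
            · exact Or.inl (Or.inl h)
            · exact Or.inl (Or.inr rfl)
            · exact Or.inr ⟨h1, h2⟩
        · rw [if_neg hc]
          have hcRL : c ∉ RL := fun h =>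
            hc ((PySem.Set.contains_iff RL c).2 h)
          constructor
          · rintro (h | h)
            · exact Or.inl h
            · exact Or.inr ⟨Or.inr h.1, h.2⟩
          · rintro (h | ⟨rfl | h1, h2⟩)
            · exact Or.inl h
            · exact absurd h2 hcRL
            · exact Or.inr ⟨h1, h2⟩
  exact this cs

lemma pvGrow_mem {n : Int} (RL C : PySem.Set Int) {x : Int} :
    x ∈ pvGrow n RL C ↔ x ∈ C ∨ (x ∈ RL ∧ ∃ p ∈ C, x ∈ pvNbrs p n) := by
  unfold pvGrow
  rw [PySem.Set.mem_union]
  have houter : ∀ (ps : List Int) (acc : PySem.Set Int),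
      x ∈ ps.foldl (fun acc p =>
          (pvNbrs p n).foldl (fun acc q =>
            if PySem.Set.contains RL q then PySem.Set.add acc q else acc) acc) acc ↔
        x ∈ acc ∨ ∃ p ∈ ps, x ∈ pvNbrs p n ∧ x ∈ RL := by
    intro ps
    induction ps with
    | nil => intro acc; simp
    | cons p ps ih =>
        intro acc
        simp only [List.foldl_cons, ih, pvGrow_inner_mem, List.mem_cons]
        constructor
        · rintro ((h | h) | ⟨p', hp', h⟩)
          · exact Or.inl h
          · exact Or.inr ⟨p, Or.inl rfl, h⟩
          · exact Or.inr ⟨p', Or.inr hp', h⟩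
        · rintro (h | ⟨p', rfl | hp', h⟩)
          · exact Or.inl (Or.inl h)
          · exact Or.inl (Or.inr h)
          · exact Or.inr ⟨p', hp', h⟩
  rw [houter]
  simp only [PySem.Set.empty, List.not_mem_nil, false_or]
  constructor
  · rintro (h | ⟨p, hp, h1, h2⟩)
    · exact Or.inl h
    · exact Or.inr ⟨h2, p, hp, h1⟩
  · rintro (h | ⟨h2, p, hp, h1⟩)
    · exact Or.inl h
    · exact Or.inr ⟨p, hp, h1, h2⟩

lemma pvGrow_nodup {n : Int} (RL C : PySem.Set Int) (hC : C.Nodup) :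
    (pvGrow n RL C).Nodup := PySem.Set.nodup_union _ _ hC

lemma pvUniv_card_le (n : Int) (g : List (List Int)) (w : Int) :
    (pvUniv n g w).card ≤ (n*n).toNat := by
  calc (pvUniv n g w).card
      ≤ ((Finset.range ((n*n).toNat)).image (Nat.cast : ℕ → Int)).card :=
        Finset.card_le_card (Finset.filter_subset _ _)
    _ ≤ (Finset.range ((n*n).toNat)).card := Finset.card_image_le
    _ = (n*n).toNat := Finset.card_range _

lemma pvGrowLoop_spec {n : Int} {g : List (List Int)} {w : Int} (hn : 0 < n)
    {RL : PySem.Set Int} {m : Int}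
    (hRLU : ∀ x ∈ RL, x ∈ pvUniv n g w)
    (hRLcl : ∀ c ∈ RL, ∀ x ∈ pvR n g w c, x ∈ RL)
    (hm : m ∈ RL) :
    ∀ (fuel : ℕ) (C : PySem.Set Int), C.Nodup → C.toFinset ⊆ pvR n g w m → m ∈ C →
      (pvR n g w m).card + 1 ≤ fuel + C.toFinset.card →
      (pvGrowLoop n RL fuel C).toFinset = pvR n g w m ∧ (pvGrowLoop n RL fuel C).Nodup := by
  have hmU : m ∈ pvUniv n g w := hRLU m hm
  have hRmRL : ∀ x ∈ pvR n g w m, x ∈ RL := hRLcl m hm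
  intro fuel
  induction fuel with
  | zero =>
      intro C hCnd hCsub hmC hfuel
      exfalso
      have : C.toFinset.card ≤ (pvR n g w m).card := Finset.card_le_card hCsub
      omega
  | succ fuel ih =>
      intro C hCnd hCsub hmC hfuel
      have hCU : C.toFinset ⊆ pvUniv n g w := hCsub.trans (pvR_subset_univ hmU)
      have hgrown : (pvGrow n RL C).toFinset = pvExpand n g w C.toFinset := by
        ext x
        rw [List.mem_toFinset, pvGrow_mem]
        simp only [pvExpand, Finset.mem_union, Finset.mem_filter, List.mem_toFinset]
        constructor
        · rintro (h | ⟨hxRL, p, hp, hnb⟩)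
          · exact Or.inl h
          · have hxU : x ∈ pvUniv n g w := hRLU x hxRL
            exact Or.inr ⟨hxU, p, hp,
              (mem_pvNbrs_iff hn (pvUniv_bounds hxU)).1 hnb⟩
        · rintro (h | ⟨hxU, p, hp, hnb⟩)
          · exact Or.inl h
          · have hpU : p ∈ pvUniv n g w := hCU (List.mem_toFinset.2 hp)
            have hxRm : x ∈ pvR n g w m :=
              pvR_closed hmU p (hCsub (List.mem_toFinset.2 hp)) x ⟨hpU, hxU, hnb⟩
            exact Or.inr ⟨hRmRL x hxRm, p, hp,
              (mem_pvNbrs_iff hn (pvUniv_bounds hxU)).2 hnb⟩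
      simp only [pvGrowLoop]
      by_cases heq : PySem.Set.equal (pvGrow n RL C) C = true
      · rw [if_pos heq]
        have hsame : (pvGrow n RL C).toFinset = C.toFinset := by
          ext x
          simp only [List.mem_toFinset]
          exact ((PySem.Set.equal_iff _ _).1 heq) x
        have hfix : pvExpand n g w C.toFinset = C.toFinset := by
          rw [← hgrown, hsame]
        have hclosed : pvClosed n g w C.toFinset := by
          intro c hc d hd
          have : d ∈ pvExpand n g w C.toFinset :=
            Finset.mem_union.2 (Or.inr (Finset.mem_filter.2 ⟨hd.2.1, c, hc, hd.2.2⟩))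
          rwa [hfix] at this
        have : pvR n g w m ⊆ C.toFinset :=
          pvR_least hclosed hmU (List.mem_toFinset.2 hmC)
        exact ⟨Finset.Subset.antisymm hCsub this, hCnd⟩
      · rw [if_neg heq]
        have hne : (pvGrow n RL C).toFinset ≠ C.toFinset := by
          intro h
          apply heq
          refine (PySem.Set.equal_iff _ _).2 (fun x => ?_)
          constructor
          · intro hx
            exact List.mem_toFinset.1 (h ▸ List.mem_toFinset.2 hx)
          · intro hx
            exact List.mem_toFinset.1 (h.symm ▸ List.mem_toFinset.2 hx)
        have hsub2 : C.toFinset ⊆ (pvGrow n RL C).toFinset := by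
          intro x hx
          rw [List.mem_toFinset, pvGrow_mem]
          exact Or.inl (List.mem_toFinset.1 hx)
        have hcard : C.toFinset.card + 1 ≤ (pvGrow n RL C).toFinset.card :=
          Finset.card_lt_card (lt_of_le_of_ne hsub2 (Ne.symm hne))
        have hGsub : (pvGrow n RL C).toFinset ⊆ pvR n g w m := by
          rw [hgrown]
          exact pvExpand_subset_of_closed (pvR_closed hmU) hCU hCsub
        refine ih (pvGrow n RL C) (pvGrow_nodup _ _ hCnd) hGsub ?_ (by omega)
        rw [pvGrow_mem]
        exact Or.inl hmC

lemma pvCount_split {n : Int} {g : List (List Int)} {w : Int} {S : Finset Int} {m : Int}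
    (hSU : S ⊆ pvUniv n g w) (hScl : ∀ c ∈ S, ∀ x ∈ pvR n g w c, x ∈ S)
    (hm : m ∈ S) (hmin : ∀ y ∈ S, m ≤ y) :
    pvCount n g w S = pvCount n g w (S \ pvR n g w m) + 1 := by
  have hmU : m ∈ pvUniv n g w := hSU hm
  have hRmS : ∀ x ∈ pvR n g w m, x ∈ S := hScl m hm
  unfold pvCount
  have e : S.filter (fun c => ∀ d ∈ pvR n g w c, c ≤ d)
      = insert m ((S \ pvR n g w m).filter (fun c => ∀ d ∈ pvR n g w c, c ≤ d)) := by
    ext c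
    simp only [Finset.mem_insert, Finset.mem_filter, Finset.mem_sdiff]
    constructor
    · rintro ⟨hcS, hpred⟩
      by_cases hcm : c = m
      · exact Or.inl hcm
      · refine Or.inr ⟨⟨hcS, fun hcRm => ?_⟩, hpred⟩
        have hcU : c ∈ pvUniv n g w := hSU hcS
        have hmRc : m ∈ pvR n g w c := by
          rw [pvR_congr hmU hcRm]
          exact pvR_self n g w m
        have h1 : c ≤ m := hpred m hmRc
        have h2 : m ≤ c := hmin c hcS
        exact hcm (by omega)
    · rintro (rfl | ⟨⟨hcS, -⟩, hpred⟩)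
      · refine ⟨hm, fun d hd => hmin d (hRmS d hd)⟩
      · exact ⟨hcS, hpred⟩
  rw [e, Finset.card_insert_of_notMem]
  simp only [Finset.mem_filter, Finset.mem_sdiff]
  rintro ⟨⟨-, hmRm⟩, -⟩
  exact hmRm (pvR_self n g w m)

lemma pvPeel_spec {n : Int} {g : List (List Int)} {w : Int} (hn : 0 < n) :
    ∀ (fuel : ℕ) (RL : PySem.Set Int) (cnt : Int), RL.Nodup →
      (∀ x ∈ RL, x ∈ pvUniv n g w) → (∀ c ∈ RL, ∀ x ∈ pvR n g w c, x ∈ RL) →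
      RL.length ≤ fuel →
      pvPeel n fuel RL cnt = cnt + (pvCount n g w RL.toFinset : Int) := by
  intro fuel
  induction fuel with
  | zero =>
      intro RL cnt hnd hU hcl hlen
      have : RL = [] := List.eq_nil_of_length_eq_zero (by omega)
      subst this
      simp [pvPeel, pvCount]
  | succ fuel ih =>
      intro RL cnt hnd hU hcl hlen
      simp only [pvPeel]
      by_cases hRL : RL = []
      · rw [if_pos hRL]
        subst hRL
        simp [pvCount]
      · rw [if_neg hRL]
        obtain ⟨m, hm⟩ : ∃ m, PySem.List.min? RL (fun x => x) = some m := by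
          cases hmin : PySem.List.min? RL (fun x => x) with
          | none => exact absurd ((PySem.List.min?_eq_none_iff _ _).1 hmin) hRL
          | some m => exact ⟨m, rfl⟩
        rw [hm]
        simp only [Option.getD_some]
        have hmRL : m ∈ RL := PySem.List.min?_mem hm
        have hmmin : ∀ y ∈ RL, m ≤ y := PySem.List.min?_isMin hm
        have hmU : m ∈ pvUniv n g w := hU m hmRL
        have hC0 : PySem.Set.add PySem.Set.empty m = [m] := rfl
        have hfuelG : (pvR n g w m).card + 1
            ≤ (n.toNat * n.toNat + 1) + ([m] : List Int).toFinset.card := by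
          have h1 : (pvR n g w m).card ≤ (pvUniv n g w).card :=
            Finset.card_le_card (pvR_subset_univ hmU)
          have h2 := pvUniv_card_le n g w
          have h3 : (n*n).toNat = n.toNat * n.toNat := by
            obtain ⟨k, rfl⟩ := Int.eq_ofNat_of_zero_le hn.le
            rw [← Int.natCast_mul, Int.toNat_natCast, Int.toNat_natCast]
          simp only [List.toFinset_cons, List.toFinset_nil]
          omega
        obtain ⟨hcompF, hcompnd⟩ := pvGrowLoop_spec hn hU hcl hmRL
          (n.toNat * n.toNat + 1) [m] (by simp) (by simp [pvR_self]) (by simp) hfuelG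
        rw [hC0] at *
        set comp := pvGrowLoop n RL (n.toNat * n.toNat + 1) [m] with hcompdef
        have hdiffF : (PySem.Set.diff RL comp).toFinset = RL.toFinset \ pvR n g w m := by
          ext x
          rw [List.mem_toFinset, PySem.Set.mem_diff, Finset.mem_sdiff,
            List.mem_toFinset, ← hcompF, List.mem_toFinset]
        have hdiffnd : (PySem.Set.diff RL comp).Nodup := PySem.Set.nodup_diff _ _ hnd
        have hRmRL : ∀ x ∈ pvR n g w m, x ∈ RL := hcl m hmRL
        have hdiffU : ∀ x ∈ PySem.Set.diff RL comp, x ∈ pvUniv n g w := by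
          intro x hx
          exact hU x ((PySem.Set.mem_diff _ _ _).1 hx).1
        have hdiffcl : ∀ c ∈ PySem.Set.diff RL comp, ∀ x ∈ pvR n g w c,
            x ∈ PySem.Set.diff RL comp := by
          intro c hc x hx
          rcases (PySem.Set.mem_diff _ _ _).1 hc with ⟨hcRL, hccomp⟩
          have hcU : c ∈ pvUniv n g w := hU c hcRL
          refine (PySem.Set.mem_diff _ _ _).2 ⟨hcl c hcRL x hx, fun hxcomp => ?_⟩
          have hxRm : x ∈ pvR n g w m := by
            rw [← List.mem_toFinset, hcompF] at hxcomp
            exact hxcomp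
          have : pvR n g w x = pvR n g w c := pvR_congr hcU hx
          have hcRm : c ∈ pvR n g w m := by
            rw [← pvR_congr hmU hxRm, this]
            exact pvR_self n g w c
          apply hccomp
          rw [← List.mem_toFinset, hcompF]
          exact hcRm
        have hlen' : (PySem.Set.diff RL comp).length ≤ fuel := by
          have h1 : (PySem.Set.diff RL comp).length = (RL.toFinset \ pvR n g w m).card := by
            rw [← hdiffF, List.toFinset_card_of_nodup hdiffnd]
          have h2 : pvR n g w m ⊆ RL.toFinset := by
            intro x hx
            exact List.mem_toFinset.2 (hRmRL x hx)
          have h3 : (RL.toFinset \ pvR n g w m).card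
              = RL.toFinset.card - (pvR n g w m).card := by
            rw [Finset.card_sdiff]
            rw [Finset.inter_eq_left.2 h2]
          have h4 : 1 ≤ (pvR n g w m).card :=
            Finset.card_pos.2 ⟨m, pvR_self n g w m⟩
          have h5 : RL.toFinset.card = RL.length := List.toFinset_card_of_nodup hnd
          have h6 : 1 ≤ RL.length := by
            cases RL with
            | nil => exact absurd rfl hRL
            | cons a t => simp
          omega
        rw [ih _ (cnt + 1) hdiffnd hdiffU hdiffcl hlen', hdiffF]
        have hsplit := pvCount_split (S := RL.toFinset) (m := m)
          (by intro x hx; exact hU x (List.mem_toFinset.1 hx))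
          (by intro c hc x hx; exact List.mem_toFinset.2 (hcl c (List.mem_toFinset.1 hc) x hx))
          (List.mem_toFinset.2 hmRL)
          (by intro y hy; exact hmmin y (List.mem_toFinset.1 hy))
        rw [hsplit]
        push_cast
        ring

lemma pvIdx_div_mod {n i j : Int} (_hi : 0 ≤ i) (_hin : i < n) (hj : 0 ≤ j) (hjn : j < n) :
    (i*n+j).ediv n = i ∧ (i*n+j).emod n = j := by
  have hn : n ≠ 0 := by omega
  constructor
  · have : (j + i * n) / n = j / n + i := Int.add_mul_ediv_right j i hn
    rw [show i*n+j = j + i*n by ring]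
    rw [show (j + i*n).ediv n = (j + i * n) / n from rfl, this,
      Int.ediv_eq_zero_of_lt hj hjn]
    ring
  · rw [show i*n+j = j + i*n by ring]
    rw [show (j + i*n).emod n = (j + i * n) % n from rfl]
    rw [Int.add_mul_emod_self_right, Int.emod_eq_of_lt hj hjn]

lemma mem_pvUniv_iff {n : Int} {g : List (List Int)} {w : Int} {x : Int} (hn : 0 < n) :
    x ∈ pvUniv n g w ↔ ∃ i j, 0 ≤ i ∧ i < n ∧ 0 ≤ j ∧ j < n ∧
      pvCell g i j > w ∧ x = i*n+j := by
  constructor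
  · intro hx
    have hb := pvUniv_bounds hx
    rcases Finset.mem_filter.1 hx with ⟨-, hcell⟩
    refine ⟨x.ediv n, x.emod n, ?_, ?_, ?_, ?_, hcell, ?_⟩
    · exact Int.ediv_nonneg hb.1 hn.le
    · exact (Int.ediv_lt_iff_lt_mul hn).2 hb.2
    · exact Int.emod_nonneg x (by omega)
    · exact Int.emod_lt_of_pos x hn
    · rw [show x.ediv n * n + x.emod n = n * (x / n) + x % n by
        rw [show x.ediv n = x / n from rfl, show x.emod n = x % n from rfl]; ring]
      rw [Int.mul_ediv_add_emod]
  · rintro ⟨i, j, hi, hin, hj, hjn, hcell, rfl⟩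
    rcases pvIdx_div_mod hi hin hj hjn with ⟨hd, hm⟩
    refine Finset.mem_filter.2 ⟨?_, by rw [hd, hm]; exact hcell⟩
    refine Finset.mem_image.2 ⟨(i*n+j).toNat, Finset.mem_range.2 ?_, ?_⟩
    · have h1 : 0 ≤ i*n+j := by positivity
      have h2 : i*n+j < n*n := by nlinarith
      omega
    · have h1 : 0 ≤ i*n+j := by positivity
      omega

lemma pvLandSet_mem {n : Int} {g : List (List Int)} {w : Int} {x : Int} (hn : 0 < n) :
    x ∈ pvLandSet n g w ↔ x ∈ pvUniv n g w := by
  rw [mem_pvUniv_iff hn]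
  unfold pvLandSet
  have hinner : ∀ (i : Int) (js : List Int) (acc : PySem.Set Int),
      x ∈ js.foldl (fun s j =>
          if pvCell g i j > w then PySem.Set.add s (i * n + j) else s) acc ↔
        x ∈ acc ∨ ∃ j ∈ js, pvCell g i j > w ∧ x = i*n+j := by
    intro i js
    induction js with
    | nil => intro acc; simp
    | cons j js ih =>
        intro acc
        simp only [List.foldl_cons, List.mem_cons, ih]
        split
        · rename_i hcell
          rw [PySem.Set.mem_add]
          constructor
          · rintro ((h | rfl) | h)
            · exact Or.inl h
            · exact Or.inr ⟨j, Or.inl rfl, hcell, rfl⟩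
            · rcases h with ⟨j', hj', h1, h2⟩
              exact Or.inr ⟨j', Or.inr hj', h1, h2⟩
          · rintro (h | ⟨j', rfl | hj', h1, h2⟩)
            · exact Or.inl (Or.inl h)
            · exact Or.inl (Or.inr h2)
            · exact Or.inr ⟨j', hj', h1, h2⟩
        · rename_i hcell
          constructor
          · rintro (h | ⟨j', hj', h1, h2⟩)
            · exact Or.inl h
            · exact Or.inr ⟨j', Or.inr hj', h1, h2⟩
          · rintro (h | ⟨j', rfl | hj', h1, h2⟩)
            · exact Or.inl h
            · exact absurd h1 hcell
            · exact Or.inr ⟨j', hj', h1, h2⟩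
  have houter : ∀ (is : List Int) (acc : PySem.Set Int),
      x ∈ is.foldl (fun s i =>
          (PySem.List.pyRange 0 n 1).foldl (fun s j =>
            if pvCell g i j > w then PySem.Set.add s (i * n + j) else s) s) acc ↔
        x ∈ acc ∨ ∃ i ∈ is, ∃ j ∈ PySem.List.pyRange 0 n 1, pvCell g i j > w ∧ x = i*n+j := by
    intro is
    induction is with
    | nil => intro acc; simp
    | cons i is ih =>
        intro acc
        simp only [List.foldl_cons, List.mem_cons, ih, hinner]
        constructor
        · rintro ((h | h) | h)
          · exact Or.inl h
          · rcases h with ⟨j, hj, h1, h2⟩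
            exact Or.inr ⟨i, Or.inl rfl, j, hj, h1, h2⟩
          · rcases h with ⟨i', hi', j, hj, h1, h2⟩
            exact Or.inr ⟨i', Or.inr hi', j, hj, h1, h2⟩
        · rintro (h | ⟨i', rfl | hi', j, hj, h1, h2⟩)
          · exact Or.inl (Or.inl h)
          · exact Or.inl (Or.inr ⟨j, hj, h1, h2⟩)
          · exact Or.inr ⟨i', hi', j, hj, h1, h2⟩
  rw [houter]
  simp only [PySem.Set.empty, List.not_mem_nil, false_or, PySem.List.mem_pyRange_one]
  constructor
  · rintro ⟨i, ⟨hi0, hin⟩, j, ⟨hj0, hjn⟩, h1, h2⟩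
    exact ⟨i, j, hi0, hin, hj0, hjn, h1, h2⟩
  · rintro ⟨i, j, hi0, hin, hj0, hjn, h1, h2⟩
    exact ⟨i, ⟨hi0, hin⟩, j, ⟨hj0, hjn⟩, h1, h2⟩

lemma pvLandSet_nodup (n : Int) (g : List (List Int)) (w : Int) :
    (pvLandSet n g w).Nodup := by
  unfold pvLandSet
  have hinner : ∀ (i : Int) (js : List Int) (acc : PySem.Set Int), acc.Nodup →
      (js.foldl (fun s j =>
          if pvCell g i j > w then PySem.Set.add s (i * n + j) else s) acc).Nodup := by
    intro i js
    induction js with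
    | nil => intro acc h; simpa using h
    | cons j js ih =>
        intro acc h
        simp only [List.foldl_cons]
        split
        · exact ih _ (PySem.Set.nodup_add _ _ h)
        · exact ih _ h
  have houter : ∀ (is : List Int) (acc : PySem.Set Int), acc.Nodup →
      (is.foldl (fun s i =>
          (PySem.List.pyRange 0 n 1).foldl (fun s j =>
            if pvCell g i j > w then PySem.Set.add s (i * n + j) else s) s) acc).Nodup := by
    intro is
    induction is with
    | nil => intro acc h; simpa using h
    | cons i is ih =>
        intro acc h
        simp only [List.foldl_cons]
        exact ih _ (hinner i _ _ h)
  exact houter _ _ (by simp [PySem.Set.empty])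

lemma bfs_alt_eq_pvCount {n : Int} {g : List (List Int)} {w : Int} (hn : 0 < n) :
    bfs_alt n g w = (pvCount n g w (pvUniv n g w) : Int) := by
  unfold bfs_alt
  have hF : (pvLandSet n g w).toFinset = pvUniv n g w := by
    ext x
    rw [List.mem_toFinset, pvLandSet_mem hn]
  rw [pvPeel_spec hn _ _ _ (pvLandSet_nodup n g w)
    (fun x hx => (pvLandSet_mem hn).1 hx)
    (fun c hc x hx => by
      rw [pvLandSet_mem hn]
      exact pvR_subset_univ ((pvLandSet_mem hn).1 hc) hx)
    le_rfl, hF]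
  ring

-- ===== A side: visited matrix representation =====
def pvMat (n : Int) (V : Finset Int) : List (List Bool) :=
  (List.range n.toNat).map (fun (i : ℕ) =>
    (List.range n.toNat).map (fun (j : ℕ) => decide ((i : Int) * n + (j : Int) ∈ V)))

lemma pvMat_empty (n : Int) :
    pvMat n ∅ = List.replicate n.toNat (List.replicate n.toNat false) := by
  unfold pvMat
  rw [List.eq_replicate_iff]
  refine ⟨by simp, ?_⟩
  intro row hrow
  rcases List.mem_map.1 hrow with ⟨i, -, rfl⟩
  rw [List.eq_replicate_iff]
  refine ⟨by simp, ?_⟩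
  intro b hb
  rcases List.mem_map.1 hb with ⟨j, -, rfl⟩
  simp

lemma pvVis_pvMat {n x y : Int} (V : Finset Int)
    (hx : 0 ≤ x ∧ x < n) (hy : 0 ≤ y ∧ y < n) :
    pvVis (pvMat n V) x y = decide (x*n+y ∈ V) := by
  unfold pvVis pvMat
  rw [PySem.List.pyGetD_eq_getElem _ _ hx.1 (by simp; omega)]
  rw [List.getElem_map, List.getElem_range]
  rw [PySem.List.pyGetD_eq_getElem _ _ hy.1 (by simp; omega)]
  rw [List.getElem_map, List.getElem_range]
  have hxx : ((x.toNat : Int)) = x := by omega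
  have hyy : ((y.toNat : Int)) = y := by omega
  rw [hxx, hyy]

lemma pvSetVis_pvMat {n x y : Int} (V : Finset Int)
    (hx : 0 ≤ x ∧ x < n) (hy : 0 ≤ y ∧ y < n) :
    pvSetVis (pvMat n V) x y = pvMat n (insert (x*n+y) V) := by
  unfold pvSetVis pvMat
  have hrow : PySem.List.pyGetD ((List.range n.toNat).map (fun (i : ℕ) =>
      (List.range n.toNat).map (fun (j : ℕ) => decide ((i : Int) * n + (j : Int) ∈ V)))) x []
      = (List.range n.toNat).map (fun (j : ℕ) => decide ((x.toNat : Int) * n + (j : Int) ∈ V)) := by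
    rw [PySem.List.pyGetD_eq_getElem _ _ hx.1 (by simp; omega)]
    rw [List.getElem_map, List.getElem_range]
  rw [hrow]
  rw [PySem.List.pySetD_of_nonneg _ _ hx.1, PySem.List.pySetD_of_nonneg _ _ hy.1]
  apply List.ext_getElem
  · simp
  intro i hi1 hi2
  have hi' : i < n.toNat := by
    simp only [List.length_set, List.length_map, List.length_range] at hi1 hi2 ⊢
    omega
  rw [List.getElem_set]
  simp only [List.getElem_map, List.getElem_range]
  by_cases hieq : x.toNat = i
  · rw [if_pos hieq]
    apply List.ext_getElem
    · simp
    intro j hj1 hj2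
    rw [List.getElem_set]
    simp only [List.getElem_map, List.getElem_range]
    simp only [List.length_map, List.length_range] at hi2 hj2
    by_cases hjeq : y.toNat = j
    · rw [if_pos hjeq]
      subst hieq hjeq
      have : (x.toNat : Int) = x := by omega
      have h2 : (y.toNat : Int) = y := by omega
      rw [this, h2]
      simp [Finset.mem_insert]
    · rw [if_neg hjeq]
      subst hieq
      have hne : (x.toNat : Int) * n + (j : Int) ≠ x*n+y := by
        intro h
        have hxx : (x.toNat : Int) = x := by omega
        rw [hxx] at h
        have : (j : Int) = y := by omega
        omega
      simp only [Finset.mem_insert]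
      congr 1
      rw [eq_iff_iff]
      constructor
      · intro h; exact Or.inr h
      · rintro (h | h)
        · exact absurd h hne
        · exact h
  · rw [if_neg hieq]
    apply List.ext_getElem
    · simp
    intro j hj1 hj2
    simp only [List.getElem_map, List.getElem_range]
    simp only [List.length_map, List.length_range] at hj2
    have hne : (i : Int) * n + (j : Int) ≠ x*n+y := by
      intro h
      have hiI : (0:Int) ≤ (i:Int) := by positivity
      have hiI2 : (i:Int) < n := by omega
      have hjI : (0:Int) ≤ (j:Int) := by positivity
      have hjI2 : (j:Int) < n := by omega
      rcases pvIdx_div_mod hiI hiI2 hjI hjI2 with ⟨hd, -⟩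
      rcases pvIdx_div_mod hx.1 hx.2 hy.1 hy.2 with ⟨hd2, -⟩
      rw [h, hd2] at hd
      omega
    simp only [Finset.mem_insert]
    congr 1
    rw [eq_iff_iff]
    constructor
    · intro h; exact Or.inr h
    · rintro (h | h)
      · exact absurd h hne
      · exact h

lemma pvSeqFilter_append (n : Int) (g : List (List Int)) (w : Int) :
    ∀ (cs ds : List Int) (V : Finset Int),
      pvSeqFilter n g w (cs ++ ds) V
        = pvSeqFilter n g w cs V
          ++ pvSeqFilter n g w ds (V ∪ (pvSeqFilter n g w cs V).toFinset) := by
  intro cs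
  induction cs with
  | nil =>
      intro ds V
      rw [List.nil_append]
      show pvSeqFilter n g w ds V
        = [] ++ pvSeqFilter n g w ds (V ∪ ([] : List Int).toFinset)
      rw [List.toFinset_nil, Finset.union_empty, List.nil_append]
  | cons c cs ih =>
      intro ds V
      simp only [List.cons_append, pvSeqFilter]
      split
      · rename_i h
        have e : V ∪ (c :: pvSeqFilter n g w cs (insert c V)).toFinset
            = insert c V ∪ (pvSeqFilter n g w cs (insert c V)).toFinset := by
          ext z
          simp only [List.toFinset_cons, Finset.mem_union, Finset.mem_insert, List.mem_toFinset]
          tauto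
        rw [e, ih, List.cons_append]
      · exact ih ds V

-- one candidate move of A's inner for-loop
def pvMoveApply (n water_height : Int) (graph : List (List Int))
    (st : List (List Bool) × List (Int × Int)) (a b : Int) :
    List (List Bool) × List (Int × Int) :=
  if 0 ≤ a ∧ a < n ∧ 0 ≤ b ∧ b < n ∧ pvCell graph a b > water_height ∧
      pvVis st.1 a b = false then
    (pvSetVis st.1 a b, st.2 ++ [(a, b)])
  else st

lemma pvStepA_eq_moves (n w : Int) (g : List (List Int))
    (st : List (List Bool) × List (Int × Int)) (x y : Int) :
    pvStepA n w g st x y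
      = pvMoveApply n w g
          (pvMoveApply n w g
            (pvMoveApply n w g
              (pvMoveApply n w g st (x+1) (y+0))
              (x + -1) (y+0))
            (x+0) (y + -1))
          (x+0) (y+1) := by
  simp only [pvStepA, pvMove, List.foldl_cons, List.foldl_nil, pvMoveApply]

lemma pvMoveApply_sim {n w : Int} {g : List (List Int)} (hn : 0 < n)
    (V : Finset Int) (acc : List (Int × Int)) (a b : Int) :
    pvMoveApply n w g (pvMat n V, acc) a b
      = if 0 ≤ a ∧ a < n ∧ 0 ≤ b ∧ b < n then
          (pvMat n (V ∪ (pvSeqFilter n g w [a*n+b] V).toFinset),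
           acc ++ (pvSeqFilter n g w [a*n+b] V).map (fun _ => (a, b)))
        else (pvMat n V, acc) := by
  unfold pvMoveApply
  by_cases hab : 0 ≤ a ∧ a < n ∧ 0 ≤ b ∧ b < n
  · rw [if_pos hab]
    rcases pvIdx_div_mod (i := a) (j := b) hab.1 hab.2.1 hab.2.2.1 hab.2.2.2 with ⟨hd, hm⟩
    have hbounds : 0 ≤ a*n+b ∧ a*n+b < n*n := by
      constructor
      · exact add_nonneg (mul_nonneg hab.1 hn.le) hab.2.2.1
      · nlinarith [hab.1, hab.2.1, hab.2.2.1, hab.2.2.2]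
    have hUiff : (a*n+b ∈ pvUniv n g w) ↔ pvCell g a b > w := by
      constructor
      · intro h
        rcases Finset.mem_filter.1 h with ⟨-, hc⟩
        rwa [hd, hm] at hc
      · intro h
        refine Finset.mem_filter.2 ⟨?_, by rw [hd, hm]; exact h⟩
        refine Finset.mem_image.2 ⟨(a*n+b).toNat, Finset.mem_range.2 (by omega), by omega⟩
    have hvis : pvVis (pvMat n V) a b = decide (a*n+b ∈ V) :=
      pvVis_pvMat V ⟨hab.1, hab.2.1⟩ ⟨hab.2.2.1, hab.2.2.2⟩
    simp only [pvSeqFilter]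
    by_cases hcond : pvCell g a b > w ∧ a*n+b ∉ V
    · have hU : a*n+b ∈ pvUniv n g w := hUiff.2 hcond.1
      rw [if_pos ⟨hab.1, hab.2.1, hab.2.2.1, hab.2.2.2, hcond.1, by simp [hvis, hcond.2]⟩]
      rw [if_pos ⟨hU, hcond.2⟩]
      simp only [List.map_cons, List.map_nil, List.toFinset_cons, List.toFinset_nil]
      rw [pvSetVis_pvMat V ⟨hab.1, hab.2.1⟩ ⟨hab.2.2.1, hab.2.2.2⟩]
      have e2 : V ∪ insert (a*n+b) (∅ : Finset Int) = insert (a*n+b) V := by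
        ext z
        simp only [Finset.mem_union, Finset.mem_insert, Finset.notMem_empty, or_false]
        tauto
      rw [e2]
    · have hif2 : (if a*n+b ∈ pvUniv n g w ∧ a*n+b ∉ V then
          [a*n+b] else ([] : List Int)) = [] :=
        if_neg (fun h => hcond ⟨hUiff.1 h.1, h.2⟩)
      rw [hif2]
      rw [if_neg]
      · simp
      · rintro ⟨-, -, -, -, hcell, hvis'⟩
        rw [hvis] at hvis'
        simp at hvis'
        exact hcond ⟨hcell, hvis'⟩
  · rw [if_neg hab, if_neg (fun h => hab ⟨h.1, h.2.1, h.2.2.1, h.2.2.2.1⟩)]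

lemma pvMoveChunk_sim {n w : Int} {g : List (List Int)} (hn : 0 < n)
    (V : Finset Int) (acc : List (Int × Int)) (a b : Int) (chunk : List Int)
    (h1 : (0 ≤ a ∧ a < n ∧ 0 ≤ b ∧ b < n) → chunk = [a*n+b])
    (h2 : ¬(0 ≤ a ∧ a < n ∧ 0 ≤ b ∧ b < n) → chunk = []) :
    pvMoveApply n w g (pvMat n V, acc) a b
      = (pvMat n (V ∪ (pvSeqFilter n g w chunk V).toFinset),
         acc ++ (pvSeqFilter n g w chunk V).map (fun q => (q.ediv n, q.emod n))) := by
  rw [pvMoveApply_sim hn]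
  by_cases hab : 0 ≤ a ∧ a < n ∧ 0 ≤ b ∧ b < n
  · rw [if_pos hab, h1 hab]
    rcases pvIdx_div_mod (i := a) (j := b) hab.1 hab.2.1 hab.2.2.1 hab.2.2.2 with ⟨hd, hm⟩
    congr 1
    simp only [pvSeqFilter]
    split
    · simp [hd, hm]
    · simp
  · rw [if_neg hab, h2 hab]
    simp [pvSeqFilter]

lemma pvStepA_sim {n w : Int} {g : List (List Int)} (hn : 0 < n)
    {x y : Int} (hx : 0 ≤ x ∧ x < n) (hy : 0 ≤ y ∧ y < n)
    (V : Finset Int) (acc : List (Int × Int)) :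
    pvStepA n w g (pvMat n V, acc) x y
      = (pvMat n (V ∪ (pvSeqFilter n g w (pvNbrM n (x*n+y)) V).toFinset),
         acc ++ (pvSeqFilter n g w (pvNbrM n (x*n+y)) V).map
           (fun q => (q.ediv n, q.emod n))) := by
  set p := x*n+y with hp
  rcases pvIdx_div_mod (i := x) (j := y) hx.1 hx.2 hy.1 hy.2 with ⟨hpd, hpm⟩
  have hb1 : 0 ≤ p := by
    rw [hp]; exact add_nonneg (mul_nonneg hx.1 hn.le) hy.1
  have hb2 : p < n*n := by
    rw [hp]; nlinarith [hx.1, hx.2, hy.1, hy.2]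
  rw [pvStepA_eq_moves]
  -- move 1: (x+1, y+0)  ↦ chunk [p+n]
  rw [pvMoveChunk_sim hn V acc (x+1) (y+0) (if p + n < n*n then [p+n] else [])
    (by
      intro h
      rw [if_pos (by nlinarith [h.2.1, hy.1, hy.2])]
      congr 1
      ring)
    (by
      intro h
      rw [if_neg]
      intro hlt
      exact h ⟨by omega, by nlinarith [hx.1, hy.1, hy.2, hlt], by omega, by omega⟩)]
  -- move 2: (x-1, y+0) ↦ chunk [p-n]
  rw [pvMoveChunk_sim hn _ _ (x + -1) (y+0) (if 0 ≤ p - n then [p-n] else [])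
    (by
      intro h
      rw [if_pos (by nlinarith [h.1, hy.1])]
      congr 1
      ring)
    (by
      intro h
      rw [if_neg]
      intro hge
      exact h ⟨by nlinarith [hge, hy.1, hy.2], by omega, by omega, by omega⟩)]
  -- move 3: (x+0, y-1) ↦ chunk [p-1]
  rw [pvMoveChunk_sim hn _ _ (x+0) (y + -1) (if p.emod n ≠ 0 then [p-1] else [])
    (by
      intro h
      rw [if_pos (by rw [hpm]; omega)]
      congr 1
      ring)
    (by
      intro h
      rw [if_neg]
      rw [hpm]
      intro hne
      exact h ⟨by omega, by omega, by omega, by omega⟩)]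
  -- move 4: (x+0, y+1) ↦ chunk [p+1]
  rw [pvMoveChunk_sim hn _ _ (x+0) (y + 1) (if (p+1).emod n ≠ 0 then [p+1] else [])
    (by
      intro h
      have hyn : y + 1 < n := h.2.2.2
      have : (p+1).emod n = y+1 := by
        have : p + 1 = x*n+(y+1) := by rw [hp]; ring
        rw [this]
        exact (pvIdx_div_mod hx.1 hx.2 (by omega) hyn).2
      rw [if_pos (by omega)]
      congr 1
      ring)
    (by
      intro h
      have hyn : ¬(y + 1 < n) := fun hlt => h ⟨by omega, by omega, by omega, hlt⟩
      have hyeq : y + 1 = n := by omega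
      have : (p+1).emod n = 0 := by
        have e : p + 1 = (x+1)*n := by rw [hp, ← hyeq]; ring
        rw [e]
        exact Int.mul_emod_left _ _
      rw [if_neg (by omega)])]
  -- assemble: pvNbrM = c1 ++ (c2 ++ (c3 ++ c4)) definitionally
  have hnbr : pvNbrM n p = (if p + n < n*n then [p+n] else [])
      ++ ((if 0 ≤ p - n then [p-n] else [])
      ++ ((if p.emod n ≠ 0 then [p-1] else [])
      ++ (if (p+1).emod n ≠ 0 then [p+1] else []))) := by
    unfold pvNbrM
    rw [List.append_assoc, List.append_assoc]
  rw [hnbr, pvSeqFilter_append n g w, pvSeqFilter_append n g w, pvSeqFilter_append n g w]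
  refine congrArg₂ Prod.mk ?_ ?_
  · congr 1
    ext z
    simp only [List.toFinset_append, Finset.mem_union, List.mem_toFinset]
    tauto
  · simp only [List.map_append, List.append_assoc]

lemma pvNN {n : Int} (hn : 0 ≤ n) : (n*n).toNat = n.toNat * n.toNat := by
  obtain ⟨k, rfl⟩ := Int.eq_ofNat_of_zero_le hn
  rw [← Int.natCast_mul, Int.toNat_natCast, Int.toNat_natCast]

lemma pvWhileA_sim {n w : Int} {g : List (List Int)} (hn : 0 < n) :
    ∀ (fuel : ℕ) (V : Finset Int) (qp : List (Int × Int)),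
      (∀ c ∈ qp, 0 ≤ c.1 ∧ c.1 < n ∧ 0 ≤ c.2 ∧ c.2 < n) →
      pvWhileA n w g fuel (pvMat n V) qp
        = pvMat n (pvFlood n g w fuel V (qp.map (fun c => c.1*n+c.2))) := by
  intro fuel
  induction fuel with
  | zero =>
      intro V qp hgood
      cases qp with
      | nil => simp [pvWhileA, pvFlood]
      | cons c rest => cases c; simp [pvWhileA, pvFlood]
  | succ fuel ih =>
      intro V qp hgood
      cases qp with
      | nil => simp [pvWhileA, pvFlood]
      | cons c rest =>
          obtain ⟨x, y⟩ := c
          have hx : 0 ≤ x ∧ x < n := by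
            have := hgood (x, y) (List.mem_cons_self ..)
            exact ⟨this.1, this.2.1⟩
          have hy : 0 ≤ y ∧ y < n := by
            have := hgood (x, y) (List.mem_cons_self ..)
            exact ⟨this.2.2.1, this.2.2.2⟩
          show pvWhileA n w g (fuel+1) (pvMat n V) ((x,y) :: rest) = _
          simp only [pvWhileA]
          rw [pvStepA_sim hn hx hy V rest]
          set fresh := pvSeqFilter n g w (pvNbrM n (x*n+y)) V with hfresh
          have hfreshU : ∀ q ∈ fresh, q ∈ pvUniv n g w := by
            intro q hq
            exact ((mem_pvSeqFilter _ _).1 hq).2.1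
          have hgood' : ∀ c ∈ rest ++ fresh.map (fun q => (q.ediv n, q.emod n)),
              0 ≤ c.1 ∧ c.1 < n ∧ 0 ≤ c.2 ∧ c.2 < n := by
            intro c hc
            rcases List.mem_append.1 hc with h | h
            · exact hgood c (List.mem_cons_of_mem _ h)
            · rcases List.mem_map.1 h with ⟨q, hq, rfl⟩
              have hb := pvUniv_bounds (hfreshU q hq)
              refine ⟨Int.ediv_nonneg hb.1 hn.le, (Int.ediv_lt_iff_lt_mul hn).2 hb.2,
                Int.emod_nonneg q (by omega), Int.emod_lt_of_pos q hn⟩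
          rw [ih _ _ hgood']
          simp only [pvFlood, List.map_cons]
          have hid : ((fun (c : Int × Int) => c.1*n+c.2) ∘ (fun (q : Int) => (q.ediv n, q.emod n))) = id := by
            funext q
            show q.ediv n * n + q.emod n = q
            rw [Int.mul_comm]
            exact Int.mul_ediv_add_emod q n
          rw [List.map_append, List.map_map, hid, List.map_id]

def pvBodyJ (n w : Int) (g : List (List Int)) (i : Int)
    (st : List (List Bool) × Int) (j : Int) : List (List Bool) × Int :=
  if pvVis st.1 i j = false ∧ pvCell g i j > w then
    let vis := pvSetVis st.1 i j
    (pvWhileA n w g (n.toNat * n.toNat + 1) vis [(i, j)], st.2 + 1)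
  else st

lemma bfs_eq_foldl (n : Int) (g : List (List Int)) (w : Int) :
    bfs n g w = ((PySem.List.pyRange 0 n 1).foldl (fun st i =>
      (PySem.List.pyRange 0 n 1).foldl (pvBodyJ n w g i) st)
      (List.replicate n.toNat (List.replicate n.toNat false), 0)).2 := rfl

lemma pvCell_sim {n w : Int} {g : List (List Int)} (hn : 0 < n)
    {i j : Int} (hi : 0 ≤ i ∧ i < n) (hj : 0 ≤ j ∧ j < n) :
    pvBodyJ n w g i (pvMat n (pvVisSet n g w (i*n+j)), (pvCnt n g w (i*n+j) : Int)) j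
      = (pvMat n (pvVisSet n g w (i*n+j+1)), (pvCnt n g w (i*n+j+1) : Int)) := by
  set k := i*n+j with hk
  set V := pvVisSet n g w k with hV
  rcases pvIdx_div_mod (i := i) (j := j) hi.1 hi.2 hj.1 hj.2 with ⟨hd, hm⟩
  have hb1 : 0 ≤ k := by rw [hk]; exact add_nonneg (mul_nonneg hi.1 hn.le) hj.1
  have hb2 : k < n*n := by rw [hk]; nlinarith [hi.1, hi.2, hj.1, hj.2]
  have hUiff : (k ∈ pvUniv n g w) ↔ pvCell g i j > w := by
    constructor
    · intro h
      rcases Finset.mem_filter.1 h with ⟨-, hc⟩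
      rwa [hd, hm] at hc
    · intro h
      refine Finset.mem_filter.2 ⟨?_, by rw [hd, hm]; exact h⟩
      exact Finset.mem_image.2 ⟨k.toNat, Finset.mem_range.2 (by omega), by omega⟩
  have hvis : pvVis (pvMat n V) i j = decide (k ∈ V) := pvVis_pvMat V hi hj
  unfold pvBodyJ
  by_cases hcond : k ∈ pvUniv n g w ∧ k ∉ V
  · rw [if_pos ⟨by simp [hvis, hcond.2], hUiff.1 hcond.1⟩]
    show (pvWhileA n w g (n.toNat * n.toNat + 1) (pvSetVis (pvMat n V) i j) [(i,j)], _) = _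
    rw [pvSetVis_pvMat V hi hj]
    rw [pvWhileA_sim hn _ (insert (i*n+j) V) [(i,j)]
      (by intro c hc; simp at hc; subst hc; exact ⟨hi.1, hi.2, hj.1, hj.2⟩)]
    have hflood : pvFlood n g w (n.toNat * n.toNat + 1) (insert k V) [k]
        = V ∪ pvR n g w k := by
      apply pvFlood_seed hcond.1 hcond.2 (pvVisSet_subset n g w k) (pvVisSet_closed n g w k)
      have h1 : (pvUniv n g w \ insert k V).card ≤ (pvUniv n g w).card :=
        Finset.card_le_card (Finset.sdiff_subset)
      have h2 := pvUniv_card_le n g w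
      have h3 := pvNN hn.le
      omega
    simp only [List.map_cons, List.map_nil]
    rw [show (i*n+j) = k from rfl, hflood]
    rcases pvCellStep_new hcond.1 hcond.2 with ⟨hv, hc, -⟩
    rw [hv, hc, ← hV]
    push_cast
    rfl
  · have hskip : k ∉ pvUniv n g w ∨ k ∈ V := by tauto
    rcases pvCellStep_skip (n := n) (g := g) (w := w) (k := k) (by
      rcases hskip with h | h
      · exact Or.inl h
      · exact Or.inr (hV ▸ h)) with ⟨hv, hc⟩
    rw [if_neg]
    · rw [← hV] at hv
      rw [hv, hc]
    · rintro ⟨h1, h2⟩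
      rcases hskip with h | h
      · exact h (hUiff.2 h2)
      · rw [hvis] at h1
        simp at h1
        exact h1 h

lemma pvInnerLoop_sim {n w : Int} {g : List (List Int)} (hn : 0 < n)
    {i : Int} (hi : 0 ≤ i ∧ i < n) :
    ∀ (m : ℕ) (a : Int), 0 ≤ a → a + m = n →
      (PySem.List.pyRange a n 1).foldl (pvBodyJ n w g i)
        (pvMat n (pvVisSet n g w (i*n+a)), (pvCnt n g w (i*n+a) : Int))
      = (pvMat n (pvVisSet n g w (i*n+n)), (pvCnt n g w (i*n+n) : Int)) := by
  intro m
  induction m with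
  | zero =>
      intro a ha0 han
      have : a = n := by omega
      subst this
      rw [PySem.List.pyRange_one_eq_nil le_rfl]
      simp
  | succ m ih =>
      intro a ha0 han
      have halt : a < n := by omega
      rw [PySem.List.pyRange_one_cons halt, List.foldl_cons]
      rw [pvCell_sim hn hi ⟨ha0, halt⟩]
      have := ih (a+1) (by omega) (by omega)
      rw [show i*n+a+1 = i*n+(a+1) by ring]
      exact this

lemma pvOuterLoop_sim {n w : Int} {g : List (List Int)} (hn : 0 < n) :
    ∀ (m : ℕ) (a : Int), 0 ≤ a → a + m = n →
      (PySem.List.pyRange a n 1).foldl (fun st i =>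
          (PySem.List.pyRange 0 n 1).foldl (pvBodyJ n w g i) st)
        (pvMat n (pvVisSet n g w (a*n)), (pvCnt n g w (a*n) : Int))
      = (pvMat n (pvVisSet n g w (n*n)), (pvCnt n g w (n*n) : Int)) := by
  intro m
  induction m with
  | zero =>
      intro a ha0 han
      have : a = n := by omega
      subst this
      rw [PySem.List.pyRange_one_eq_nil le_rfl]
      simp
  | succ m ih =>
      intro a ha0 han
      have halt : a < n := by omega
      rw [PySem.List.pyRange_one_cons halt, List.foldl_cons]
      have hrow := pvInnerLoop_sim (w := w) (g := g) hn (i := a) ⟨ha0, halt⟩ n.toNat 0 le_rfl (by omega)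
      rw [show a*n+0 = a*n by ring] at hrow
      rw [hrow]
      have := ih (a+1) (by omega) (by omega)
      rw [show a*n+n = (a+1)*n by ring]
      exact this

lemma bfs_eq_pvCount {n : Int} {g : List (List Int)} {w : Int} (hn : 0 < n) :
    bfs n g w = (pvCount n g w (pvUniv n g w) : Int) := by
  have hout := pvOuterLoop_sim (w := w) (g := g) hn n.toNat 0 le_rfl (by omega)
  norm_num at hout
  rw [pvVisSet_zero, pvCnt_zero, pvMat_empty] at hout
  norm_num at hout
  rw [bfs_eq_foldl, hout, pvCnt_final]

theorem bfs_eq_alt (n : Int) (g : List (List Int)) (w : Int) :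
    bfs n g w = bfs_alt n g w := by
  by_cases hn : 0 < n
  · rw [bfs_eq_pvCount hn, bfs_alt_eq_pvCount hn]
  · have hle : n ≤ 0 := by omega
    have hrange : PySem.List.pyRange 0 n 1 = [] := PySem.List.pyRange_one_eq_nil hle
    rw [bfs_eq_foldl, hrange]
    unfold bfs_alt pvLandSet
    rw [hrange]
    rfl

-- ===== VERDICT (by name: the statement is the Claim_ definition above) =====
theorem bfs_spec : Claim_equal_bfs := by
  intro n graph water_height _ _
  exact bfs_eq_alt n graph water_height
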